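-- pv_equiv track=rewrite | github.com/simogiovanardi/DCS_Project | functions/drones_formation_path.py | generate_zigzag
-- ===== SOURCE A (Python) =====
-- def generate_zigzag(rows, cols, height):
--     zigzag_path = []
--     for col in range(cols):
--         if col % 2 == 0:  # Even column: top-to-bottom
--             for row in range(rows):
--                 zigzag_path.append([row, col, height])
--         else:  # Odd column: bottom-to-top
--             for row in range(rows - 1, -1, -1):
--                 zigzag_path.append([row, col, height])
--     return zigzag_path
-- ===== SOURCE B (Python) =====
-- def generate_zigzag(rows, cols, height):
--     # Closed-form: one flat loop over cell indices; divmod recovers (col, row).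
--     if rows <= 0 or cols <= 0:
--         return []
--     path = []
--     for i in range(rows * cols):
--         col, r = divmod(i, rows)
--         path.append([rows - 1 - r if col % 2 else r, col, height])
--     return path
-- ===== Notes on version B (the rewrite author's own statement) =====
-- stated objective: alternative
-- what changed: Replaces the two nested loops with parity branch by a single flat loop over cell indices 0..rows*cols-1, recovering (col,row) with divmod and computing the zigzag row arithmetically.
import Mathlib
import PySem

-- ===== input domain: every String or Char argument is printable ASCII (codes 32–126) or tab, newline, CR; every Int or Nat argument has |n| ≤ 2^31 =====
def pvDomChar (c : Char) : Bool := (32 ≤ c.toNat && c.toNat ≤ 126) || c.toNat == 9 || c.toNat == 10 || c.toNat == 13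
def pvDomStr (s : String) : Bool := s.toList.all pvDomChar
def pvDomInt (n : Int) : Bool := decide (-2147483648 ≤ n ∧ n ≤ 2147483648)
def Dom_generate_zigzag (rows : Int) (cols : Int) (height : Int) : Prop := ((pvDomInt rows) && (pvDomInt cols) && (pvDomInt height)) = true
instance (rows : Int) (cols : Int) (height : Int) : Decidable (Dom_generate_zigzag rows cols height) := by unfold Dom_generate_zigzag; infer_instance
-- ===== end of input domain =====

-- B replaces the nested per-column loops with one flat loop over cell indices, recovering
-- (col, row) by divmod; same cost, different (arithmetic) decomposition.

-- ===== PORT A =====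
def generate_zigzag (rows : Int) (cols : Int) (height : Int) : List (List Int) :=
  (PySem.List.pyRange 0 cols 1).foldl (fun acc col =>
    if PySem.Int.mod col 2 == 0 then
      (PySem.List.pyRange 0 rows 1).foldl (fun acc2 row => acc2 ++ [[row, col, height]]) acc
    else
      (PySem.List.pyRange (rows - 1) (-1) (-1)).foldl (fun acc2 row => acc2 ++ [[row, col, height]]) acc) []

-- ===== PORT B =====
def generate_zigzag_alt (rows : Int) (cols : Int) (height : Int) : List (List Int) :=
  if rows ≤ 0 || cols ≤ 0 then []
  else
    (PySem.List.pyRange 0 (rows * cols) 1).foldl (fun acc i =>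
      let col := PySem.Int.floordiv i rows
      let r := PySem.Int.mod i rows
      acc ++ [[if PySem.Int.mod col 2 != 0 then rows - 1 - r else r, col, height]]) []

-- ===== PRECONDITION & SPEC =====
def Spec_generate_zigzag (rows : Int) (cols : Int) (height : Int) (out : List (List Int)) : Prop := out = generate_zigzag_alt rows cols height
instance (rows : Int) (cols : Int) (height : Int) (out : List (List Int)) : Decidable (Spec_generate_zigzag rows cols height out) := by unfold Spec_generate_zigzag; infer_instance

-- ===== CLAIM (what is proved, stated in full; the proofs are below) =====
def Claim_equal_generate_zigzag : Prop := ∀ (rows : Int) (cols : Int) (height : Int), Dom_generate_zigzag rows cols height → Spec_generate_zigzag rows cols height (generate_zigzag rows cols height)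

-- ===== LEMMAS AND PROOFS =====

-- A as a flatMap of per-column blocks
theorem genA_eq_flatMap (rows cols height : Int) :
    generate_zigzag rows cols height =
      (PySem.List.pyRange 0 cols 1).flatMap (fun col =>
        if PySem.Int.mod col 2 == 0 then
          (PySem.List.pyRange 0 rows 1).map (fun row => [row, col, height])
        else
          (PySem.List.pyRange (rows - 1) (-1) (-1)).map (fun row => [row, col, height])) := by
  unfold generate_zigzag
  have hb : (fun (acc : List (List Int)) col =>
      if PySem.Int.mod col 2 == 0 then
        (PySem.List.pyRange 0 rows 1).foldl (fun acc2 row => acc2 ++ [[row, col, height]]) acc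
      else
        (PySem.List.pyRange (rows - 1) (-1) (-1)).foldl (fun acc2 row => acc2 ++ [[row, col, height]]) acc)
      = (fun acc col => acc ++ (if PySem.Int.mod col 2 == 0 then
          (PySem.List.pyRange 0 rows 1).map (fun row => [row, col, height])
        else
          (PySem.List.pyRange (rows - 1) (-1) (-1)).map (fun row => [row, col, height]))) := by
    funext acc col
    by_cases h : PySem.Int.mod col 2 == 0
    · rw [if_pos h, if_pos h, PySem.List.foldl_append_singleton_eq_map]
    · rw [if_neg h, if_neg h, PySem.List.foldl_append_singleton_eq_map]
  rw [hb, PySem.List.foldl_append_eq_flatMap]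
  simp

-- B as a map over cell indices
theorem genB_eq_map (rows cols height : Int) (hr : 0 < rows) (hc : 0 < cols) :
    generate_zigzag_alt rows cols height =
      (PySem.List.pyRange 0 (rows * cols) 1).map (fun i =>
        [if PySem.Int.mod (PySem.Int.floordiv i rows) 2 != 0 then
            rows - 1 - PySem.Int.mod i rows else PySem.Int.mod i rows,
          PySem.Int.floordiv i rows, height]) := by
  unfold generate_zigzag_alt
  have hg : ¬ (rows ≤ 0 || cols ≤ 0) = true := by simp; constructor <;> omega
  rw [if_neg hg]
  simp only []
  rw [PySem.List.foldl_append_singleton_eq_map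
    (f := fun i => [if PySem.Int.mod (PySem.Int.floordiv i rows) 2 != 0 then
            rows - 1 - PySem.Int.mod i rows else PySem.Int.mod i rows,
          PySem.Int.floordiv i rows, height])]
  simp

-- the key combinatorial identity, at the level of Nat ranges
theorem key (R : Nat) (hR : 0 < R) (height : Int) :
    ∀ C : Nat,
      (List.range C).flatMap (fun (c : Nat) =>
        if PySem.Int.mod (↑c) 2 == 0 then
          (List.range R).map (fun (r : Nat) => [(↑r : Int), (↑c : Int), height])
        else
          (List.range R).map (fun (r : Nat) => [((R : Int) - 1) - (↑r : Int), (↑c : Int), height]))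
      = (List.range (R * C)).map (fun (i : Nat) =>
          [if PySem.Int.mod (PySem.Int.floordiv (↑i) (R : Int)) 2 != 0 then
              (R : Int) - 1 - PySem.Int.mod (↑i) (R : Int)
            else PySem.Int.mod (↑i) (R : Int),
            PySem.Int.floordiv (↑i) (R : Int), height]) := by
  intro C
  induction C with
  | zero => simp
  | succ C ih =>
    rw [List.range_succ, List.flatMap_append, ih, Nat.mul_succ, List.range_add,
      List.map_append, List.map_map]
    congr 1
    have hblock : ∀ r ∈ List.range R,
        ((fun (i : Nat) =>
          [if PySem.Int.mod (PySem.Int.floordiv (↑i) (R : Int)) 2 != 0 then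
              (R : Int) - 1 - PySem.Int.mod (↑i) (R : Int)
            else PySem.Int.mod (↑i) (R : Int),
            PySem.Int.floordiv (↑i) (R : Int), height]) ∘ (fun x => (R * C + x : Nat))) r
        = (if PySem.Int.mod (C : Int) 2 == 0 then
            [(↑r : Int), (C : Int), height]
          else
            [((R : Int) - 1) - (↑r : Int), (C : Int), height]) := by
      intro r hr
      have hrR : r < R := List.mem_range.mp hr
      have hdiv : (R * C + r) / R = C := by
        rw [Nat.mul_add_div hR, Nat.div_eq_of_lt hrR]
        omega
      have hmod : (R * C + r) % R = r := by
        rw [Nat.mul_add_mod]; exact Nat.mod_eq_of_lt hrR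
      simp only [Function.comp_apply, PySem.Int.floordiv_natCast, PySem.Int.mod_natCast,
        hdiv, hmod]
      have hm : PySem.Int.mod (↑C) 2 = ((C % 2 : Nat) : Int) := by
        rw [show ((2:Int)) = ((2:Nat):Int) by norm_num, PySem.Int.mod_natCast]
      by_cases hpar : C % 2 = 0
      · rw [hm, hpar]; simp
      · have h1 : C % 2 = 1 := by omega
        rw [hm, h1]; simp
    rw [List.map_congr_left hblock]
    simp only [List.flatMap_cons, List.flatMap_nil, List.append_nil]
    by_cases hpar : (PySem.Int.mod (C : Int) 2 == 0) = true
    · rw [if_pos hpar]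
      simp only [hpar, if_true]
    · rw [if_neg hpar]
      simp only [hpar, if_false, Bool.false_eq_true]

theorem main_pos (rows cols height : Int) (hr : 0 < rows) (hc : 0 < cols) :
    generate_zigzag rows cols height = generate_zigzag_alt rows cols height := by
  obtain ⟨R, rfl⟩ : ∃ R : Nat, rows = (R : Int) := ⟨rows.toNat, by omega⟩
  obtain ⟨C, rfl⟩ : ∃ C : Nat, cols = (C : Int) := ⟨cols.toNat, by omega⟩
  have hR : 0 < R := by exact_mod_cast hr
  rw [genA_eq_flatMap, genB_eq_map _ _ _ hr hc]
  rw [show ((R : Int) * (C : Int)) = ((R * C : Nat) : Int) by push_cast; ring]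
  simp only [PySem.List.pyRange_zero_natCast, PySem.List.pyRange_neg_one,
    List.map_map, List.flatMap_map, Function.comp_def]
  rw [show (((R : Int) - 1) - (-1)).toNat = R by omega]
  rw [← key R hR height C]

-- ===== VERDICT (by name: the statement is the Claim_ definition above) =====
theorem generate_zigzag_spec : Claim_equal_generate_zigzag := by
  intro rows cols height _hd
  unfold Spec_generate_zigzag
  by_cases hr : 0 < rows
  · by_cases hc : 0 < cols
    · exact main_pos rows cols height hr hc
    · rw [genA_eq_flatMap]
      unfold generate_zigzag_alt
      rw [PySem.List.pyRange_one_eq_nil (show cols ≤ (0:Int) by omega),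
        if_pos (show (rows ≤ 0 || cols ≤ 0) = true by simp; omega)]
      simp
  · rw [genA_eq_flatMap]
    unfold generate_zigzag_alt
    rw [PySem.List.pyRange_one_eq_nil (show rows ≤ (0:Int) by omega),
      PySem.List.pyRange_neg_one_eq_nil (show rows - 1 ≤ (-1:Int) by omega),
      if_pos (show (rows ≤ 0 || cols ≤ 0) = true by simp; omega)]
    simp
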